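-- pv_equiv track=rewrite | github.com/ldayton/Parable | src/parable/ast.py | _normalize_array_whitespace
-- ===== SOURCE A (Python) =====
-- def _normalize_array_whitespace(value: str) -> str:
--     """Normalize whitespace inside array assignments: arr=(a  b\tc) -> arr=(a b c)."""
--     # Match array assignment pattern: name=( or name+=(
--     if not value.endswith(")"):
--         return value
--     # Parse identifier: starts with letter/underscore, then alnum/underscore
--     i = 0
--     if not (i < len(value) and (value[i].isalpha() or value[i] == "_")):
--         return value
--     i += 1
--     while i < len(value) and (value[i].isalnum() or value[i] == "_"):
--         i += 1
--     # Optional + for +=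
--     if i < len(value) and value[i] == "+":
--         i += 1
--     # Must have =(
--     if not (i + 1 < len(value) and value[i] == "=" and value[i + 1] == "("):
--         return value
--     prefix = value[: i + 1]  # e.g., "arr=" or "arr+="
--     # Extract content inside parentheses
--     inner = value[len(prefix) + 1 : -1]
--     # Normalize whitespace while respecting quotes
--     normalized = []
--     i = 0
--     in_whitespace = True  # Start true to skip leading whitespace
--     while i < len(inner):
--         ch = inner[i]
--         if ch in " \t\n":
--             if not in_whitespace and normalized:
--                 normalized.append(" ")
--                 in_whitespace = True
--             i += 1
--         elif ch == "'":
--             # Single-quoted string - preserve as-is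
--             in_whitespace = False
--             j = i + 1
--             while j < len(inner) and inner[j] != "'":
--                 j += 1
--             normalized.append(inner[i : j + 1])
--             i = j + 1
--         elif ch == '"':
--             # Double-quoted string - preserve as-is
--             in_whitespace = False
--             j = i + 1
--             while j < len(inner):
--                 if inner[j] == "\\" and j + 1 < len(inner):
--                     j += 2
--                 elif inner[j] == '"':
--                     break
--                 else:
--                     j += 1
--             normalized.append(inner[i : j + 1])
--             i = j + 1
--         elif ch == "\\" and i + 1 < len(inner):
--             # Escape sequence
--             in_whitespace = False
--             normalized.append(inner[i : i + 2])
--             i += 2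
--         else:
--             in_whitespace = False
--             normalized.append(ch)
--             i += 1
--     # Strip trailing space
--     result = "".join(normalized).rstrip(" ")
--     return prefix + "(" + result + ")"
-- ===== SOURCE B (Python) =====
-- def _normalize_array_whitespace(value: str) -> str:
--     """Normalize whitespace inside array assignments: arr=(a  b\tc) -> arr=(a b c)."""
--     if not value.endswith(")"):
--         return value
--     # Locate the "=(" that opens the array and validate the name before it.
--     j = value.find("=(")
--     if j < 1:
--         return value
--     name = value[:j]
--     if name.endswith("+"):
--         name = name[:-1]
--     if not name or not (name[0].isalpha() or name[0] == "_"):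
--         return value
--     if not all(c.isalnum() or c == "_" for c in name[1:]):
--         return value
--     prefix = value[: j + 1]
--     inner = value[j + 2 : -1]
--     # Tokenize into maximal non-whitespace words; quotes/escapes are atomic.
--     words = []
--     i = 0
--     n = len(inner)
--     while i < n:
--         if inner[i] in " \t\n":
--             i += 1
--             continue
--         start = i
--         while i < n and inner[i] not in " \t\n":
--             c = inner[i]
--             if c == "'":
--                 k = inner.find("'", i + 1)
--                 i = n if k < 0 else k + 1
--             elif c == '"':
--                 i += 1
--                 while i < n and inner[i] != '"':
--                     i += 2 if inner[i] == "\\" and i + 1 < n else 1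
--                 if i < n:
--                     i += 1
--             elif c == "\\" and i + 1 < n:
--                 i += 2
--             else:
--                 i += 1
--         words.append(inner[start:i])
--     return prefix + "(" + " ".join(words).rstrip(" ") + ")"
-- ===== Notes on version B (the rewrite author's own statement) =====
-- stated objective: alternative
-- what changed: B locates the array opener with str.find and validates the name as a slice instead of walking an index cursor, and replaces A's flag-driven character appender (in_whitespace state, piece-by-piece normalized list, trailing rstrip) by an explicit tokenizer that consumes whole words atomically (quotes/escapes included) and joins them with single spaces.
import Mathlib
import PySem

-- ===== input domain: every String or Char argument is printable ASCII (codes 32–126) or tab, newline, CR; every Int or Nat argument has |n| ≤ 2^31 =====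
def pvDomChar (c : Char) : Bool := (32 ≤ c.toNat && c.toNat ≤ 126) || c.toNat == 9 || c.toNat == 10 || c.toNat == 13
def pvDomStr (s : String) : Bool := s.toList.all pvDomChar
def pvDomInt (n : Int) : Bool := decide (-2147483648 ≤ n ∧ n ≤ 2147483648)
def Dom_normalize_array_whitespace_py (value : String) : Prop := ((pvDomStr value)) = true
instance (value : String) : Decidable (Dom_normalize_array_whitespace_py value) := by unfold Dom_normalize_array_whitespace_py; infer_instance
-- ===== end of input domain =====

-- B rewrites the inner normalization as a one-pass tokenizer into whole words joined by single
-- spaces, and locates the "=(" with str.find instead of re-scanning the identifier cursor;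
-- objective: alternative decomposition (same asymptotic cost). Equivalence of return values is proved.

-- `ch in " \t\n"` — the whitespace test both Pythons perform
def pvIsWs (c : Char) : Bool := c == ' ' || c == '\t' || c == '\n'

-- s.rstrip(" ") — hand port (PySem.Chars.rstrip strips all whitespace, Python here strips spaces only);
-- exact: removes exactly the maximal run of ' ' at the right end. Both Pythons call .rstrip(" ").
def pvRstripSp (cs : List Char) : List Char := (cs.reverse.dropWhile (· == ' ')).reverse

-- ===== PORT A =====
-- the identifier while-loop: number of leading alnum/underscore characters
def pvCntIdent : List Char → Nat
  | [] => 0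
  | c :: r => if PySem.Chars.strIsalnum [c] || c == '_' then pvCntIdent r + 1 else 0

-- single-quote scan: j - (i+1), i.e. chars before the closing quote (all of r if unterminated)
def pvSqLen : List Char → Nat
  | [] => 0
  | c :: r => if c == '\'' then 0 else pvSqLen r + 1

-- double-quote scan of A (backslash-with-successor first, then closing quote, else step one)
def pvDqLen : List Char → Nat
  | [] => 0
  | '\\' :: _ :: r => pvDqLen r + 2
  | c :: r => if c == '"' then 0 else pvDqLen r + 1

-- A's main while-loop; state = (suffix of inner, normalized, in_whitespace); pieces are slices
-- inner[i:…] = take on the suffix (Python slices clamp, as take/drop do)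
def pvLoopA (s : List Char) (acc : List (List Char)) (inws : Bool) : List (List Char) :=
  match s with
  | [] => acc
  | c :: rest =>
    if pvIsWs c then
      if !inws && !acc.isEmpty then pvLoopA rest (acc ++ [[' ']]) true
      else pvLoopA rest acc inws
    else if c == '\'' then
      pvLoopA ((c :: rest).drop (pvSqLen rest + 2)) (acc ++ [(c :: rest).take (pvSqLen rest + 2)]) false
    else if c == '"' then
      pvLoopA ((c :: rest).drop (pvDqLen rest + 2)) (acc ++ [(c :: rest).take (pvDqLen rest + 2)]) false
    else if c == '\\' && !rest.isEmpty then
      pvLoopA ((c :: rest).drop 2) (acc ++ [(c :: rest).take 2]) false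
    else
      pvLoopA rest (acc ++ [[c]]) false
termination_by s.length
decreasing_by all_goals simp [List.length_drop] <;> omega

def normalize_array_whitespace_py (value : String) : String :=
  let cs := value.toList
  if !(PySem.Chars.endswith cs [')']) then value else
  match cs with
  | [] => value
  | c0 :: rest0 =>
    if !(PySem.Chars.strIsalpha [c0] || c0 == '_') then value else
    let k := pvCntIdent rest0 + 1
    let k2 := if cs[k]? == some '+' then k + 1 else k
    if !(decide (k2 + 1 < cs.length) && cs[k2]? == some '=' && cs[k2+1]? == some '(') then value else
    let pfx := cs.take (k2 + 1)
    let inner := PySem.List.slice cs (some ((k2 : Int) + 2)) (some (-1))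
    String.ofList (pfx ++ '(' :: pvRstripSp (pvLoopA inner [] true).flatten ++ [')'])

-- ===== PORT B =====
-- double-quote scan of B (closing quote tested first, then backslash-with-successor)
def pvDqSkipB : List Char → Nat
  | [] => 0
  | '"' :: _ => 0
  | '\\' :: _ :: r => pvDqSkipB r + 2
  | c :: r => if c == '"' then 0 else pvDqSkipB r + 1

-- one atomic consumption of B's inner word loop (head of s is not whitespace)
def pvStepB (s : List Char) : Nat :=
  match s with
  | [] => 1
  | c :: rest =>
    if c == '\'' then
      let f := PySem.Chars.find rest ['\'']
      if f < 0 then (c :: rest).length else f.toNat + 2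
    else if c == '"' then
      let sk := pvDqSkipB rest
      if !(rest.drop sk).isEmpty then sk + 2 else sk + 1
    else if c == '\\' && !rest.isEmpty then 2
    else 1

theorem pvStepB_pos (s : List Char) : 1 ≤ pvStepB s := by
  unfold pvStepB
  match s with
  | [] => simp
  | c :: rest => dsimp only; split_ifs <;> simp

-- B's inner while-loop: length of the maximal word starting at s
def pvWordLen (s : List Char) : Nat :=
  match s with
  | [] => 0
  | c :: rest =>
    if pvIsWs c then 0
    else pvStepB (c :: rest) + pvWordLen ((c :: rest).drop (pvStepB (c :: rest)))
termination_by s.length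
decreasing_by
  have := pvStepB_pos (c :: rest); simp [List.length_drop]; omega

theorem pvWordLen_pos (c : Char) (rest : List Char) (h : pvIsWs c = false) :
    1 ≤ pvWordLen (c :: rest) := by
  unfold pvWordLen; rw [h]; have := pvStepB_pos (c :: rest); simp; omega

-- B's outer loop: collect the words
def pvWords (s : List Char) : List (List Char) :=
  match s with
  | [] => []
  | c :: rest =>
    if pvIsWs c then pvWords rest
    else
      (c :: rest).take (pvWordLen (c :: rest)) :: pvWords ((c :: rest).drop (pvWordLen (c :: rest)))
termination_by s.length
decreasing_by
  · simp
  · rename_i hw; have := pvWordLen_pos c rest (by simpa using hw); simp [List.length_drop]; omega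

def normalize_array_whitespace_py_alt (value : String) : String :=
  let cs := value.toList
  if !(PySem.Chars.endswith cs [')']) then value else
  let f := PySem.Chars.find cs ['=', '(']
  if f < 1 then value else
  let name := cs.take f.toNat
  let name2 := if PySem.Chars.endswith name ['+'] then name.dropLast else name
  match name2 with
  | [] => value
  | c0 :: rest0 =>
    if !(PySem.Chars.strIsalpha [c0] || c0 == '_') then value else
    if !(rest0.all fun c => PySem.Chars.strIsalnum [c] || c == '_') then value else
    let pfx := cs.take (f.toNat + 1)
    let inner := PySem.List.slice cs (some (f + 2)) (some (-1))
    String.ofList (pfx ++ '(' :: pvRstripSp (PySem.Chars.join [' '] (pvWords inner)) ++ [')'])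

-- ===== PRECONDITION & SPEC =====
def Spec_normalize_array_whitespace_py (value : String) (out : String) : Prop := out = normalize_array_whitespace_py_alt value
instance (value : String) (out : String) : Decidable (Spec_normalize_array_whitespace_py value out) := by unfold Spec_normalize_array_whitespace_py; infer_instance

-- ===== CLAIM (what is proved, stated in full; the proofs are below) =====
def Claim_equal_normalize_array_whitespace_py : Prop := ∀ (value : String), Dom_normalize_array_whitespace_py value → Spec_normalize_array_whitespace_py value (normalize_array_whitespace_py value)

-- ===== LEMMAS AND PROOFS =====

-- abstraction of A's loop: the flattened output still to be produced, with b = "a separator is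
-- due at the next whitespace" (= ¬in_whitespace ∧ normalized ≠ [])
def pvG (s : List Char) (b : Bool) : List Char :=
  match s with
  | [] => []
  | c :: rest =>
    if pvIsWs c then (if b then ' ' :: pvG rest false else pvG rest b)
    else if c == '\'' then (c :: rest).take (pvSqLen rest + 2) ++ pvG ((c :: rest).drop (pvSqLen rest + 2)) true
    else if c == '"' then (c :: rest).take (pvDqLen rest + 2) ++ pvG ((c :: rest).drop (pvDqLen rest + 2)) true
    else if c == '\\' && !rest.isEmpty then (c :: rest).take 2 ++ pvG ((c :: rest).drop 2) true
    else [c] ++ pvG rest true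
termination_by s.length
decreasing_by all_goals simp [List.length_drop] <;> omega

def pvLead (s : List Char) : List Char :=
  match s with
  | [] => []
  | c :: _ => if pvIsWs c then [' '] else []

def pvIdentC (c : Char) : Bool := PySem.Chars.strIsalnum [c] || c == '_'

theorem pv_isEmpty_app (l : List (List Char)) (x : List Char) : (l ++ [x]).isEmpty = false := by simp

theorem pvLoopA_flatten (s : List Char) (acc : List (List Char)) (inws : Bool) :
    (pvLoopA s acc inws).flatten = acc.flatten ++ pvG s (!inws && !acc.isEmpty) := by
  fun_induction pvLoopA s acc inws with
  | case1 => simp [pvG]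
  | case2 acc inws c rest hws hcond ih =>
    rw [ih]; simp only [pvG, hws]; rw [hcond]; simp
  | case3 acc inws c rest hws hcond ih =>
    have hb : (!inws && !acc.isEmpty) = false := by simpa using hcond
    rw [ih]; simp only [pvG, hws]; rw [hb]; simp
  | case4 acc inws c rest hws hq ih =>
    rw [ih]; simp [pvG, hws, hq, pv_isEmpty_app]
  | case5 acc inws c rest hws hq hq2 ih =>
    rw [ih]; simp [pvG, hws, hq, hq2, pv_isEmpty_app]
  | case6 acc inws c rest hws hq hq2 hesc ih =>
    rw [ih]; simp [pvG, hws, hq, hq2, hesc, pv_isEmpty_app]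
  | case7 acc inws c rest hws hq hq2 hesc ih =>
    rw [ih]; simp [pvG, hws, hq, hq2, hesc, pv_isEmpty_app]

theorem pvPrefix_single (x : Char) (l : List Char) : [x] <+: l ↔ l[0]? = some x := by
  constructor
  · rintro ⟨t, rfl⟩; rfl
  · intro h
    cases l with
    | nil => simp at h
    | cons a r => simp only [List.getElem?_cons_zero, Option.some.injEq] at h; exact ⟨r, by simp [h]⟩

theorem pvPrefix_pair (x y : Char) (l : List Char) : [x, y] <+: l ↔ l[0]? = some x ∧ l[1]? = some y := by
  constructor
  · rintro ⟨t, rfl⟩; exact ⟨rfl, rfl⟩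
  · intro h
    match l, h with
    | a :: b :: r, ⟨h1, h2⟩ =>
      simp only [List.getElem?_cons_zero, List.getElem?_cons_succ, Option.some.injEq] at h1 h2
      exact ⟨r, by simp [h1, h2]⟩

theorem pvSuffix_single (x : Char) (l : List Char) : [x] <:+ l ↔ l.getLast? = some x := by
  rw [← List.reverse_prefix, List.getLast?_eq_head?_reverse]
  cases l.reverse <;> simp [eq_comm]

theorem pvSqLen_get_ne (r : List Char) : ∀ i < pvSqLen r, r[i]? ≠ some '\'' := by
  induction r with
  | nil => simp [pvSqLen]
  | cons c r ih =>
    intro i hi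
    simp only [pvSqLen] at hi
    split at hi
    · omega
    · next hc =>
      cases i with
      | zero => intro h; simp only [List.getElem?_cons_zero, Option.some.injEq] at h; simp [h] at hc
      | succ j => simpa using ih j (by omega)

theorem pvSqLen_stop (r : List Char) : pvSqLen r = r.length ∨ r[pvSqLen r]? = some '\'' := by
  induction r with
  | nil => simp [pvSqLen]
  | cons c r ih =>
    simp only [pvSqLen]
    split
    · next hc => right; simpa using eq_of_beq hc
    · rcases ih with h | h
      · left; simp [h]
      · right; simpa using h

theorem pvFind_sq (r : List Char) :
    (PySem.Chars.find r ['\''] < 0 → pvSqLen r = r.length) ∧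
    (0 ≤ PySem.Chars.find r ['\''] → pvSqLen r = (PySem.Chars.find r ['\'']).toNat) := by
  constructor
  · intro hneg
    have hm1 : PySem.Chars.find r ['\''] = -1 := by
      have := PySem.Chars.neg_one_le_find r ['\'']
      omega
    have hni : ¬ (['\''] <:+: r) := (PySem.Chars.find_eq_neg_one_iff r ['\'']).1 hm1
    have hno : ¬ ∃ j, ['\''] <+: r.drop j := by
      intro hj
      exact hni ((PySem.Chars.isIn_iff_infix _ _).1 ((PySem.Chars.exists_prefix_drop_iff_isIn _ _).1 hj))
    rcases pvSqLen_stop r with h | h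
    · exact h
    · exact absurd ⟨pvSqLen r, (pvPrefix_single _ _).2 (by simpa using h)⟩ hno
  · intro hpos
    obtain ⟨hpre, hmin⟩ := PySem.Chars.find_spec hpos
    have hat : r[(PySem.Chars.find r ['\'']).toNat]? = some '\'' := by
      have := (pvPrefix_single _ _).1 hpre
      simpa using this
    have hlt : (PySem.Chars.find r ['\'']).toNat < r.length := (List.getElem?_eq_some_iff.1 hat).1
    have h1 : ¬ (PySem.Chars.find r ['\'']).toNat < pvSqLen r := fun h =>
      pvSqLen_get_ne r _ h hat
    have h2 : ¬ pvSqLen r < (PySem.Chars.find r ['\'']).toNat := by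
      intro h
      rcases pvSqLen_stop r with hs | hs
      · omega
      · exact hmin _ h ((pvPrefix_single _ _).2 (by simpa using hs))
    omega

theorem pvDqSkipB_eq (r : List Char) : pvDqSkipB r = pvDqLen r := by
  fun_induction pvDqSkipB r <;> simp_all [pvDqLen]

theorem pvDqLen_le (r : List Char) : pvDqLen r ≤ r.length := by
  fun_induction pvDqLen r <;> simp_all <;> omega

-- a word of B is consumed atomically by A's loop, whatever the pending-separator flag
theorem pvWord_split : ∀ n (c : Char) (rest : List Char), (c :: rest).length ≤ n →
    pvIsWs c = false → ∀ b,
    pvG (c :: rest) b =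
      (c :: rest).take (pvWordLen (c :: rest)) ++ pvG ((c :: rest).drop (pvWordLen (c :: rest))) true := by
  intro n
  induction n with
  | zero => intro c rest h; simp at h
  | succ n ih =>
    intro c rest hlen hws b
    -- one atomic step: A's consumption LA, rewritten to B's step st
    have hstep : pvG (c :: rest) b =
        (c :: rest).take (pvStepB (c :: rest)) ++ pvG ((c :: rest).drop (pvStepB (c :: rest))) true := by
      by_cases hq : (c == '\'') = true
      · have hs : pvG (c :: rest) b =
            (c :: rest).take (pvSqLen rest + 2) ++ pvG ((c :: rest).drop (pvSqLen rest + 2)) true := by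
          simp only [pvG, hws]; simp [hq]
        rw [hs]
        by_cases hf : PySem.Chars.find rest ['\''] < 0
        · have hsq : pvSqLen rest = rest.length := (pvFind_sq rest).1 hf
          have hst : pvStepB (c :: rest) = rest.length + 1 := by
            simp only [pvStepB, hq]; simp [hf]
          rw [hst, hsq]
          rw [List.take_of_length_le (by simp), List.take_of_length_le (by simp),
              List.drop_of_length_le (by simp), List.drop_of_length_le (by simp)]
        · have hsq : pvSqLen rest = (PySem.Chars.find rest ['\'']).toNat :=
            (pvFind_sq rest).2 (by omega)
          have hst : pvStepB (c :: rest) = (PySem.Chars.find rest ['\'']).toNat + 2 := by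
            simp only [pvStepB, hq]; simp [hf]
          rw [hst, hsq]
      · by_cases hq2 : (c == '"') = true
        · have hs : pvG (c :: rest) b =
              (c :: rest).take (pvDqLen rest + 2) ++ pvG ((c :: rest).drop (pvDqLen rest + 2)) true := by
            simp only [pvG, hws]; simp [hq, hq2]
          rw [hs]
          by_cases he : (rest.drop (pvDqSkipB rest)).isEmpty = true
          · have hlen2 : pvDqLen rest = rest.length := by
              have h1 := pvDqLen_le rest
              have h2 : rest.length ≤ pvDqSkipB rest := by
                simpa [List.isEmpty_iff, List.drop_eq_nil_iff] using he
              rw [pvDqSkipB_eq] at h2; omega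
            have hst : pvStepB (c :: rest) = pvDqSkipB rest + 1 := by
              simp only [pvStepB, hq, hq2]; simp [he, hq]
            rw [hst, pvDqSkipB_eq, hlen2]
            rw [List.take_of_length_le (by simp), List.take_of_length_le (by simp),
                List.drop_of_length_le (by simp), List.drop_of_length_le (by simp)]
          · have hst : pvStepB (c :: rest) = pvDqSkipB rest + 2 := by
              simp only [pvStepB, hq, hq2]; simp [he, hq]
            rw [hst, pvDqSkipB_eq]
        · by_cases hesc : (c == '\\' && !rest.isEmpty) = true
          · have hs : pvG (c :: rest) b = (c :: rest).take 2 ++ pvG ((c :: rest).drop 2) true := by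
              simp only [pvG, hws]; simp [hq, hq2, hesc]
            have hst : pvStepB (c :: rest) = 2 := by
              simp only [pvStepB, hq, hq2]; simp [hesc, hq, hq2]
            rw [hs, hst]
          · have hs : pvG (c :: rest) b = [c] ++ pvG rest true := by
              simp only [pvG, hws]; simp [hq, hq2, hesc]
            have hst : pvStepB (c :: rest) = 1 := by
              simp only [pvStepB, hq, hq2]; simp [hesc, hq, hq2]
            rw [hs, hst]; simp
    rw [hstep]
    have hw : pvWordLen (c :: rest) = pvStepB (c :: rest) + pvWordLen ((c :: rest).drop (pvStepB (c :: rest))) := by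
      simp only [pvWordLen, hws]; simp
    rw [hw]
    rcases hd : (c :: rest).drop (pvStepB (c :: rest)) with _ | ⟨c', r'⟩
    · simp [pvWordLen, pvG, hd]
    · by_cases hwc : pvIsWs c' = true
      · have h0 : pvWordLen (c' :: r') = 0 := by simp only [pvWordLen]; simp [hwc]
        rw [h0]; simp [hd]
      · have hlt : (c' :: r').length ≤ n := by
          have h1 := pvStepB_pos (c :: rest)
          have h2 : ((c :: rest).drop (pvStepB (c :: rest))).length = (c :: rest).length - pvStepB (c :: rest) := by
            simp
          rw [hd] at h2
          simp at h2 hlen ⊢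
          omega
        rw [ih c' r' hlt (by simpa using hwc) true, ← hd]
        rw [List.take_add, ← List.drop_drop, List.append_assoc]

-- after a maximal word the remaining suffix is empty or starts with whitespace
theorem pvWord_stop : ∀ n (c : Char) (rest : List Char), (c :: rest).length ≤ n →
    pvIsWs c = false → ∀ c' r', (c :: rest).drop (pvWordLen (c :: rest)) = c' :: r' →
    pvIsWs c' = true := by
  intro n
  induction n with
  | zero => intro c rest h; simp at h
  | succ n ih =>
    intro c rest hlen hws c' r' hd
    have hw : pvWordLen (c :: rest) = pvStepB (c :: rest) + pvWordLen ((c :: rest).drop (pvStepB (c :: rest))) := by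
      simp only [pvWordLen, hws]; simp
    rw [hw, ← List.drop_drop] at hd
    rcases he : (c :: rest).drop (pvStepB (c :: rest)) with _ | ⟨c2, r2⟩
    · rw [he] at hd; simp at hd
    · rw [he] at hd
      by_cases hwc : pvIsWs c2 = true
      · have h0 : pvWordLen (c2 :: r2) = 0 := by simp only [pvWordLen]; simp [hwc]
        rw [h0, List.drop_zero] at hd
        cases hd
        exact hwc
      · have hlt : (c2 :: r2).length ≤ n := by
          have h1 := pvStepB_pos (c :: rest)
          have h2 : ((c :: rest).drop (pvStepB (c :: rest))).length = (c :: rest).length - pvStepB (c :: rest) := by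
            simp
          rw [he] at h2
          simp at h2 hlen ⊢
          omega
        exact ih c2 r2 hlt (by simpa using hwc) c' r' hd

theorem pvG_join : ∀ n (s : List Char), s.length ≤ n → ∀ b,
    ∃ eps, (eps = [] ∨ eps = [' ']) ∧
      pvG s b = (if b then pvLead s else []) ++ PySem.Chars.join [' '] (pvWords s) ++ eps ∧
      (pvWords s = [] → eps = []) := by
  intro n
  induction n with
  | zero =>
    intro s h b
    have hs : s = [] := by cases s <;> simp_all
    subst hs
    exact ⟨[], by simp, by simp [pvG, pvWords, pvLead, PySem.Chars.join_nil], fun _ => rfl⟩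
  | succ n ih =>
    intro s hlen b
    cases s with
    | nil => exact ⟨[], by simp, by simp [pvG, pvWords, pvLead, PySem.Chars.join_nil], fun _ => rfl⟩
    | cons c rest =>
      by_cases hws : pvIsWs c = true
      · have hwords : pvWords (c :: rest) = pvWords rest := by simp only [pvWords]; simp [hws]
        obtain ⟨eps, heps, hval, hnil⟩ := ih rest (by simp at hlen ⊢; omega) false
        cases b
        · refine ⟨eps, heps, ?_, by rw [hwords]; exact hnil⟩
          simp only [pvG, hws]
          simp [hval, hwords]
        · refine ⟨eps, heps, ?_, by rw [hwords]; exact hnil⟩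
          simp only [pvG, hws]
          simp [hval, hwords, pvLead, hws]
      · have hws' : pvIsWs c = false := by simpa using hws
        have hsplit := pvWord_split (n + 1) c rest hlen hws' b
        have hwords : pvWords (c :: rest) =
            (c :: rest).take (pvWordLen (c :: rest)) :: pvWords ((c :: rest).drop (pvWordLen (c :: rest))) := by
          simp only [pvWords]; simp [hws]
        rcases hd : (c :: rest).drop (pvWordLen (c :: rest)) with _ | ⟨c2, r2⟩
        · refine ⟨[], by simp, ?_, by simp [hwords]⟩
          rw [hsplit, hd, hwords, hd]
          simp [pvG, pvWords, PySem.Chars.join_singleton, PySem.Chars.join_nil, pvLead, hws']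
        · have hwc2 : pvIsWs c2 = true := pvWord_stop (n + 1) c rest hlen hws' c2 r2 hd
          have hlt : (c2 :: r2).length ≤ n := by
            have h1 := pvWordLen_pos c rest hws'
            have h2 : ((c :: rest).drop (pvWordLen (c :: rest))).length =
                (c :: rest).length - pvWordLen (c :: rest) := by simp
            rw [hd] at h2
            simp at h2 hlen ⊢
            omega
          obtain ⟨eps, heps, hval, hnil⟩ := ih (c2 :: r2) hlt true
          rcases hw2 : pvWords (c2 :: r2) with _ | ⟨w2, ws2⟩
          · refine ⟨[' '], by simp, ?_, by simp [hwords]⟩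
            rw [hsplit, hd, hval, hw2, hwords, hd, hw2]
            simp [pvLead, hwc2, hnil hw2, PySem.Chars.join_singleton, PySem.Chars.join_nil, hws']
          · refine ⟨eps, heps, ?_, by simp [hwords]⟩
            rw [hsplit, hd, hval, hw2, hwords, hd, hw2]
            rw [PySem.Chars.join_cons_cons]
            simp [pvLead, hwc2, hws']

theorem pvRstrip_snoc (x : List Char) : pvRstripSp (x ++ [' ']) = pvRstripSp x := by
  simp [pvRstripSp]

theorem pvInner_eq (s : List Char) :
    pvRstripSp (pvLoopA s [] true).flatten = pvRstripSp (PySem.Chars.join [' '] (pvWords s)) := by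
  rw [pvLoopA_flatten]
  obtain ⟨eps, heps, hval, _⟩ := pvG_join s.length s le_rfl false
  simp only [List.flatten_nil, List.nil_append, List.isEmpty_nil, Bool.not_true, Bool.and_false]
  rw [hval]
  rcases heps with h | h <;> subst h
  · simp
  · simp only [if_neg, Bool.false_eq_true, not_false_eq_true, List.nil_append]
    rw [pvRstrip_snoc]

-- ===== the front-end (prefix parsing) =====
def pvK2 (c0 : Char) (rest0 : List Char) : Nat :=
  if (c0 :: rest0)[pvCntIdent rest0 + 1]? == some '+' then pvCntIdent rest0 + 1 + 1
  else pvCntIdent rest0 + 1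

def pvACond (cs : List Char) : Prop :=
  ∃ c0 rest0, cs = c0 :: rest0 ∧ (PySem.Chars.strIsalpha [c0] || c0 == '_') = true ∧
    cs[pvK2 c0 rest0]? = some '=' ∧ cs[pvK2 c0 rest0 + 1]? = some '('

def pvBCond (cs : List Char) : Prop :=
  1 ≤ PySem.Chars.find cs ['=', '('] ∧
    (let name := cs.take (PySem.Chars.find cs ['=', '(']).toNat
     let name2 := if PySem.Chars.endswith name ['+'] then name.dropLast else name
     ∃ c0 rest0, name2 = c0 :: rest0 ∧ (PySem.Chars.strIsalpha [c0] || c0 == '_') = true ∧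
       (rest0.all fun c => PySem.Chars.strIsalnum [c] || c == '_') = true)

theorem pvCnt_take_all (r : List Char) : (r.take (pvCntIdent r)).all pvIdentC = true := by
  induction r with
  | nil => simp [pvCntIdent]
  | cons c r ih =>
    simp only [pvCntIdent]
    split
    · next hc => simpa [pvIdentC, hc] using ih
    · simp

theorem pvCnt_eq_of (r : List Char) (m : Nat) (c : Char) (hall : (r.take m).all pvIdentC = true)
    (hm : r[m]? = some c) (hc : pvIdentC c = false) : pvCntIdent r = m := by
  induction r generalizing m with
  | nil => simp at hm
  | cons a r ih =>
    cases m with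
    | zero => simp at hm; subst hm; simp only [pvCntIdent]; rw [if_neg (by simpa [pvIdentC] using hc)]
    | succ m =>
      simp only [List.take_succ_cons, List.all_cons, Bool.and_eq_true] at hall
      simp only [List.getElem?_cons_succ] at hm
      simp only [pvCntIdent]
      rw [if_pos (by simpa [pvIdentC] using hall.1)]
      rw [ih m hall.2 hm]

theorem pvDropLast_take (l : List Char) (n : Nat) (h : n ≤ l.length) :
    (l.take n).dropLast = l.take (n - 1) := by
  rw [List.dropLast_eq_take, List.take_take]
  congr 1
  simp [h]

theorem pvGetLast_take (l : List Char) (n : Nat) (h1 : 1 ≤ n) (h2 : n ≤ l.length) :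
    (l.take n).getLast? = l[n - 1]? := by
  rw [List.getLast?_eq_getElem?, List.getElem?_take_of_lt (by simp [h2]; omega)]
  congr 1
  simp [h2]

theorem pvCnt_get_ident (r : List Char) :
    ∀ i < pvCntIdent r, ∀ c, r[i]? = some c → pvIdentC c = true := by
  induction r with
  | nil => simp [pvCntIdent]
  | cons a r ih =>
    intro i hi c hc
    simp only [pvCntIdent] at hi
    split at hi
    · next ha =>
      cases i with
      | zero => simp only [List.getElem?_cons_zero, Option.some.injEq] at hc; subst hc; exact ha
      | succ j => exact ih j (by omega) c (by simpa using hc)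
    · omega

theorem pvFind_at (cs : List Char) (m : Nat) (h0 : cs[m]? = some '=') (h1 : cs[m+1]? = some '(')
    (hmin : ∀ p < m, cs[p]? ≠ some '=') : PySem.Chars.find cs ['=', '('] = (m : Int) := by
  have hocc : ['=', '('] <+: cs.drop m := by
    rw [pvPrefix_pair]
    constructor
    · rw [List.getElem?_drop]; simpa using h0
    · rw [List.getElem?_drop]; simpa using h1
  have hne : PySem.Chars.find cs ['=', '('] ≠ -1 := by
    rw [Ne, PySem.Chars.find_eq_neg_one_iff, not_not]
    exact (PySem.Chars.isIn_iff_infix _ _).1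
      ((PySem.Chars.exists_prefix_drop_iff_isIn _ _).1 ⟨m, hocc⟩)
  have hpos : 0 ≤ PySem.Chars.find cs ['=', '('] := by
    have := PySem.Chars.neg_one_le_find cs ['=', '(']
    omega
  obtain ⟨hpre, hm⟩ := PySem.Chars.find_spec hpos
  have h1' : ¬ (PySem.Chars.find cs ['=', '(']).toNat < m := fun h => by
    have := ((pvPrefix_pair _ _ _).1 hpre).1
    rw [List.getElem?_drop] at this
    exact hmin _ h (by simpa using this)
  have h2' : ¬ m < (PySem.Chars.find cs ['=', '(']).toNat := fun h => hm m h hocc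
  omega

theorem pvAtoJ (cs : List Char) (c0 : Char) (rest0 : List Char) (hcs : cs = c0 :: rest0)
    (hal : (PySem.Chars.strIsalpha [c0] || c0 == '_') = true)
    (he : cs[pvK2 c0 rest0]? = some '=') (hp : cs[pvK2 c0 rest0 + 1]? = some '(') :
    PySem.Chars.find cs ['=', '('] = (pvK2 c0 rest0 : Int) := by
  apply pvFind_at cs (pvK2 c0 rest0) he hp
  intro p hp2
  subst hcs
  -- p = 0: the head is a letter or underscore; 1 ≤ p ≤ cnt: an identifier char; p = cnt+1 (+= case): '+'
  cases p with
  | zero =>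
    intro h
    simp only [List.getElem?_cons_zero, Option.some.injEq] at h
    subst h
    simp [PySem.Chars.strIsalpha] at hal
    exact absurd hal (by decide)
  | succ q =>
    intro h
    simp only [List.getElem?_cons_succ] at h
    unfold pvK2 at hp2
    by_cases hq : q < pvCntIdent rest0
    · have := pvCnt_get_ident rest0 q hq '=' h
      exact absurd this (by decide)
    · -- q = cnt and we are in the '+' branch, so rest0[q] = '+'
      split at hp2
      · next hplus =>
        have hq' : q = pvCntIdent rest0 := by omega
        subst hq'
        simp only [List.getElem?_cons_succ] at hplus
        rw [h] at hplus
        simp at hplus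
      · omega

theorem pvName2_eq (cs : List Char) (c0 : Char) (rest0 : List Char) (hcs : cs = c0 :: rest0)
    (hal : (PySem.Chars.strIsalpha [c0] || c0 == '_') = true)
    (he : cs[pvK2 c0 rest0]? = some '=') (hp : cs[pvK2 c0 rest0 + 1]? = some '(') :
    (if PySem.Chars.endswith (cs.take (PySem.Chars.find cs ['=', '(']).toNat) ['+'] = true
     then (cs.take (PySem.Chars.find cs ['=', '(']).toNat).dropLast
     else cs.take (PySem.Chars.find cs ['=', '(']).toNat) = c0 :: rest0.take (pvCntIdent rest0) := by
  have hfind := pvAtoJ cs c0 rest0 hcs hal he hp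
  have hk2len : pvK2 c0 rest0 < cs.length := (List.getElem?_eq_some_iff.1 he).1
  have hk21 : 1 ≤ pvK2 c0 rest0 := by unfold pvK2; split <;> omega
  rw [hfind]
  simp only [Int.toNat_natCast]
  by_cases hplus : ((c0 :: rest0)[pvCntIdent rest0 + 1]? == some '+') = true
  · have hk2 : pvK2 c0 rest0 = pvCntIdent rest0 + 1 + 1 := by unfold pvK2; rw [if_pos hplus]
    have hplus' : cs[pvCntIdent rest0 + 1]? = some '+' := by rw [hcs]; simpa using hplus
    have hlast : (cs.take (pvK2 c0 rest0)).getLast? = some '+' := by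
      rw [pvGetLast_take cs _ hk21 (by omega), hk2]
      simpa using hplus'
    rw [if_pos ((PySem.Chars.endswith_iff _ _).2 ((pvSuffix_single _ _).2 hlast))]
    rw [pvDropLast_take cs _ (by omega), hk2]
    rw [hcs]; rfl
  · have hk2 : pvK2 c0 rest0 = pvCntIdent rest0 + 1 := by unfold pvK2; rw [if_neg hplus]
    have hlast : (cs.take (pvK2 c0 rest0)).getLast? = cs[pvCntIdent rest0]? := by
      rw [pvGetLast_take cs _ hk21 (by omega), hk2]
      congr 1
    have hnp : ¬ PySem.Chars.endswith (cs.take (pvK2 c0 rest0)) ['+'] = true := by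
      intro hend
      have := (pvSuffix_single _ _).1 ((PySem.Chars.endswith_iff _ _).1 hend)
      rw [hlast] at this
      cases hcnt : pvCntIdent rest0 with
      | zero =>
        rw [hcnt] at this
        rw [hcs] at this
        simp only [List.getElem?_cons_zero, Option.some.injEq] at this
        subst this
        exact absurd hal (by decide)
      | succ q =>
        rw [hcnt] at this
        rw [hcs] at this
        simp only [List.getElem?_cons_succ] at this
        have := pvCnt_get_ident rest0 q (by omega) '+' this
        exact absurd this (by decide)
    rw [if_neg hnp, hk2]
    rw [hcs]; rfl

theorem pvBtoA (cs : List Char) (hB : pvBCond cs) : pvACond cs := by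
  obtain ⟨hf1, hB2⟩ := hB
  dsimp only at hB2
  obtain ⟨c0, rest0, hname2, hal, hall⟩ := hB2
  have hpos : 0 ≤ PySem.Chars.find cs ['=', '('] := by omega
  obtain ⟨hpre, hmin⟩ := PySem.Chars.find_spec hpos
  have hm1 : 1 ≤ (PySem.Chars.find cs ['=', '(']).toNat := by omega
  obtain ⟨h0, h1⟩ := (pvPrefix_pair _ _ _).1 hpre
  rw [List.getElem?_drop] at h0 h1
  simp only [Nat.add_zero] at h0
  have hmlen : (PySem.Chars.find cs ['=', '(']).toNat < cs.length := by
    have := (List.getElem?_eq_some_iff.1 h0).1; omega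
  cases hcs : cs with
  | nil => rw [hcs] at h0; simp at h0
  | cons a rest' =>
    rw [hcs] at hname2 h0 h1 hmlen hm1
    set m := (PySem.Chars.find (a :: rest') ['=', '(']).toNat with hm
    by_cases hplus : PySem.Chars.endswith ((a :: rest').take m) ['+'] = true
    · rw [if_pos hplus, pvDropLast_take _ _ (by simp at hmlen ⊢; omega)] at hname2
      have hm2 : 2 ≤ m := by
        by_contra hlt
        have hm' : m = 1 := by omega
        rw [hm'] at hname2
        simp at hname2
      have htk : (a :: rest').take (m - 1) = a :: rest'.take (m - 2) := by
        have : m - 1 = (m - 2) + 1 := by omega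
        rw [this, List.take_succ_cons]
      rw [htk] at hname2
      obtain ⟨rfl, hr0⟩ : a = c0 ∧ rest'.take (m - 2) = rest0 := by
        exact ⟨by injection hname2, by injection hname2⟩
      have hlast : (a :: rest')[m - 1]? = some '+' := by
        have := (pvSuffix_single _ _).1 ((PySem.Chars.endswith_iff _ _).1 hplus)
        rw [pvGetLast_take _ _ (by omega) (by simp at hmlen ⊢; omega)] at this
        exact this
      have hplus' : rest'[m - 2]? = some '+' := by
        have : m - 1 = (m - 2) + 1 := by omega
        rw [this] at hlast
        simpa using hlast
      have hcnt : pvCntIdent rest' = m - 2 :=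
        pvCnt_eq_of rest' (m - 2) '+' (by rw [hr0]; simpa [pvIdentC] using hall) hplus' (by decide)
      have hk2 : pvK2 a rest' = m := by
        unfold pvK2
        rw [hcnt]
        have : m - 2 + 1 = m - 1 := by omega
        rw [this, if_pos (by simpa using hlast)]
        omega
      exact ⟨a, rest', rfl, hal, by rw [hk2]; exact h0, by rw [hk2]; exact h1⟩
    · rw [if_neg hplus] at hname2
      have htk : (a :: rest').take m = a :: rest'.take (m - 1) := by
        have : m = (m - 1) + 1 := by omega
        rw [this, List.take_succ_cons]
        congr 2
      rw [htk] at hname2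
      obtain ⟨rfl, hr0⟩ : a = c0 ∧ rest'.take (m - 1) = rest0 := by
        exact ⟨by injection hname2, by injection hname2⟩
      have heq : rest'[m - 1]? = some '=' := by
        have : m = (m - 1) + 1 := by omega
        rw [this] at h0
        simpa using h0
      have hcnt : pvCntIdent rest' = m - 1 :=
        pvCnt_eq_of rest' (m - 1) '=' (by rw [hr0]; simpa [pvIdentC] using hall) heq (by decide)
      have hk2 : pvK2 a rest' = m := by
        unfold pvK2
        rw [hcnt]
        have h2 : m - 1 + 1 = m := by omega
        rw [h2, if_neg (by rw [h0]; decide)]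
      exact ⟨a, rest', rfl, hal, by rw [hk2]; exact h0, by rw [hk2]; exact h1⟩

-- ===== VERDICT (by name: the statement is the Claim_ definition above) =====
theorem normalize_array_whitespace_py_spec : Claim_equal_normalize_array_whitespace_py := by
  unfold Claim_equal_normalize_array_whitespace_py
  intro value _
  unfold Spec_normalize_array_whitespace_py
  by_cases hend : PySem.Chars.endswith value.toList [')'] = true
  · by_cases hA : pvACond value.toList
    · have hAc := hA
      obtain ⟨c0, rest0, hcs, hal, he, hp⟩ := hAc
      have hfind := pvAtoJ value.toList c0 rest0 hcs hal he hp
      have hname2 := pvName2_eq value.toList c0 rest0 hcs hal he hp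
      have hk2len : pvK2 c0 rest0 + 1 < value.toList.length := (List.getElem?_eq_some_iff.1 hp).1
      rw [hcs] at hend hfind hname2 hk2len
      have hk21 : 1 ≤ pvK2 c0 rest0 := by unfold pvK2; split <;> omega
      have hkr : (if ((c0 :: rest0)[pvCntIdent rest0 + 1]? == some '+') = true
          then pvCntIdent rest0 + 1 + 1 else pvCntIdent rest0 + 1) = pvK2 c0 rest0 := rfl
      simp only [normalize_array_whitespace_py, normalize_array_whitespace_py_alt]
      rw [hcs]
      rw [if_neg (show ¬ (!PySem.Chars.endswith (c0 :: rest0) [')']) = true by simp [hend]),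
          if_neg (show ¬ (!PySem.Chars.endswith (c0 :: rest0) [')']) = true by simp [hend])]
      dsimp only
      rw [hkr]
      rw [if_neg (show ¬ (!(PySem.Chars.strIsalpha [c0] || c0 == '_')) = true by simp [hal])]
      rw [if_neg (show ¬ (!(decide (pvK2 c0 rest0 + 1 < (c0 :: rest0).length) &&
            ((c0 :: rest0)[pvK2 c0 rest0]? == some '=') &&
            ((c0 :: rest0)[pvK2 c0 rest0 + 1]? == some '('))) = true by
        rw [hcs] at he hp
        simp only [List.length_cons] at hk2len
        simp [he, hp]
        omega)]
      rw [hfind]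
      rw [if_neg (show ¬ ((pvK2 c0 rest0 : Int) < 1) by exact_mod_cast Nat.not_lt.2 hk21)]
      rw [hfind] at hname2
      rw [hname2]
      dsimp only
      rw [if_neg (show ¬ (!(PySem.Chars.strIsalpha [c0] || c0 == '_')) = true by simp [hal])]
      have hallb : ((rest0.take (pvCntIdent rest0)).all fun c =>
          PySem.Chars.strIsalnum [c] || c == '_') = true := pvCnt_take_all rest0
      rw [if_neg (show ¬ (!((rest0.take (pvCntIdent rest0)).all fun c =>
            PySem.Chars.strIsalnum [c] || c == '_')) = true by simp [hallb])]
      simp only [Int.toNat_natCast]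
      rw [pvInner_eq]
    · have hAv : normalize_array_whitespace_py value = value := by
        simp only [normalize_array_whitespace_py]
        split
        · rfl
        · split
          · rfl
          · next c0 rest0 heq =>
            split
            · rfl
            · next hal' =>
              split
              · next hplus =>
                split
                · rfl
                · next hcond =>
                  exfalso
                  apply hA
                  rw [heq] at hplus hcond ⊢
                  have hk2 : pvK2 c0 rest0 = pvCntIdent rest0 + 1 + 1 := by
                    unfold pvK2; rw [if_pos hplus]
                  simp at hcond
                  have halb : (PySem.Chars.strIsalpha [c0] || c0 == '_') = true := by
                    revert hal'
                    cases (PySem.Chars.strIsalpha [c0] || c0 == '_') <;> simp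
                  exact ⟨c0, rest0, rfl, halb,
                    by rw [hk2]; simpa using hcond.1.2, by rw [hk2]; simpa using hcond.2⟩
              · next hplus =>
                split
                · rfl
                · next hcond =>
                  exfalso
                  apply hA
                  rw [heq] at hplus hcond ⊢
                  have hk2 : pvK2 c0 rest0 = pvCntIdent rest0 + 1 := by
                    unfold pvK2; rw [if_neg hplus]
                  simp at hcond
                  have halb : (PySem.Chars.strIsalpha [c0] || c0 == '_') = true := by
                    revert hal'
                    cases (PySem.Chars.strIsalpha [c0] || c0 == '_') <;> simp
                  exact ⟨c0, rest0, rfl, halb,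
                    by rw [hk2]; simpa using hcond.1.2, by rw [hk2]; simpa using hcond.2⟩
      have hBv : normalize_array_whitespace_py_alt value = value := by
        simp only [normalize_array_whitespace_py_alt]
        split
        · rfl
        · next hf' =>
          split
          · rfl
          · next hf =>
            split
            · rfl
            · next c0 r0 hps =>
              split
              · rfl
              · next h1 =>
                split
                · rfl
                · next h2 =>
                  exfalso
                  apply hA
                  apply pvBtoA
                  refine ⟨by omega, c0, r0, hps, ?_, ?_⟩
                  · revert h1
                    cases hx : (PySem.Chars.strIsalpha [c0] || c0 == '_') <;> simp
                  · revert h2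
                    cases hx : (r0.all fun c => PySem.Chars.strIsalnum [c] || c == '_') <;> simp
      rw [hAv, hBv]
  · simp only [normalize_array_whitespace_py, normalize_array_whitespace_py_alt]
    rw [if_pos (by simp [hend]), if_pos (by simp [hend])]
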